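-- pv_equiv track=rewrite | github.com/Dniel-BM/Algoritmos-em-Python | 02lista-de-frutas.py | esta_no_dicionario
-- ===== SOURCE A (Python) =====
-- def esta_no_dicionario(palavras, busca):
--     """Verifica se uma palavra está na lista, e se não estiver, sugere a anterior e próxima"""
--     palavras_ordenadas = sorted(palavras)
--
--     if busca in palavras_ordenadas:
--         return f"'{busca}' foi encontrada!"
--
--     # Procurando posição da palavra
--     for i, palavra in enumerate(palavras_ordenadas):
--         if busca < palavra:
--             anterior = palavras_ordenadas[i - 1] if i > 0 else " "
--             return f"'{busca}' não encontrada. Você quis dizer '{anterior}' ou '{palavra}'?"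
--
--     return f"'{busca}' não encontrada. Última palavra é '{palavras_ordenadas[-1]}'."
-- ===== SOURCE B (Python) =====
-- def esta_no_dicionario(palavras, busca):
--     """Verifica se uma palavra está na lista, e se não estiver, sugere a anterior e próxima"""
--     if busca in palavras:
--         return f"'{busca}' foi encontrada!"
--
--     maiores = [p for p in palavras if p > busca]
--     if not maiores:
--         return f"'{busca}' não encontrada. Última palavra é '{max(palavras)}'."
--
--     menores = [p for p in palavras if p < busca]
--     anterior = max(menores) if menores else " "
--     return f"'{busca}' não encontrada. Você quis dizer '{anterior}' ou '{min(maiores)}'?"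
-- ===== Notes on version B (the rewrite author's own statement) =====
-- stated objective: alternative
-- what changed: B drops the sort and the linear first-greater scan entirely: it partitions the list into words below and above busca and answers with max/min of those partitions (and max of the whole list for the past-the-end case), instead of sorting and scanning for the first greater word.
import Mathlib
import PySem

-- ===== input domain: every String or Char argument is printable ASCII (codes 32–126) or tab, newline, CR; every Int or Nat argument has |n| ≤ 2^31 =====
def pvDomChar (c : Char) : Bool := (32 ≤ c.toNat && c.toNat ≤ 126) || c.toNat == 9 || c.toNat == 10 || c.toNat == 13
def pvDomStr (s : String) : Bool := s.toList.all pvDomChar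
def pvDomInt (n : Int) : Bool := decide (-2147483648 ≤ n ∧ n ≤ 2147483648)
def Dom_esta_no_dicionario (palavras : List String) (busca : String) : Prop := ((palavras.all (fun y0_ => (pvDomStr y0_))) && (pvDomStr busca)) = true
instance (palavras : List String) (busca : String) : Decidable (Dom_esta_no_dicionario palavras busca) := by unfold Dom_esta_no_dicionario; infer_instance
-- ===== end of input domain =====

-- B replaces A's sort + linear first-greater scan by max/min over the words below/above busca (no sort); same return value wherever A returns.


-- ===== PORT A =====
-- the 'for i, palavra in enumerate(palavras_ordenadas): if busca < palavra: return …' loop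
def pvALoop (s : List String) (busca : String) : List (Int × String) → Option String
  | [] => none
  | (i, palavra) :: rest =>
    if busca < palavra then
      some ("'" ++ busca ++ "' não encontrada. Você quis dizer '" ++
        (if i > 0 then (PySem.List.pyGet? s (i - 1)).getD "" else " ") ++
        "' ou '" ++ palavra ++ "'?")
    else pvALoop s busca rest

def esta_no_dicionario (palavras : List String) (busca : String) : String :=
  let palavras_ordenadas := PySem.List.sorted palavras (fun x => x) false
  if busca ∈ palavras_ordenadas then "'" ++ busca ++ "' foi encontrada!"
  else
    match pvALoop palavras_ordenadas busca (PySem.List.enumerate palavras_ordenadas 0) with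
    | some r => r
    | none => "'" ++ busca ++ "' não encontrada. Última palavra é '" ++
        (PySem.List.pyGet? palavras_ordenadas (-1)).getD "" ++ "'."

-- ===== PORT B =====
def esta_no_dicionario_alt (palavras : List String) (busca : String) : String :=
  if busca ∈ palavras then "'" ++ busca ++ "' foi encontrada!"
  else
    let maiores := palavras.filter (fun p => decide (busca < p))
    if maiores = [] then
      "'" ++ busca ++ "' não encontrada. Última palavra é '" ++
        (PySem.List.max? palavras (fun x => x)).getD "" ++ "'."
    else
      let menores := palavras.filter (fun p => decide (p < busca))
      let anterior := if menores = [] then " " else (PySem.List.max? menores (fun x => x)).getD ""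
      "'" ++ busca ++ "' não encontrada. Você quis dizer '" ++ anterior ++ "' ou '" ++
        (PySem.List.min? maiores (fun x => x)).getD "" ++ "'?"

-- ===== PRECONDITION & SPEC =====
-- Pre_ excludes only the empty list, on which A raises IndexError (and B raises ValueError).
def Pre_esta_no_dicionario (palavras : List String) (busca : String) : Prop := palavras ≠ []
instance (palavras : List String) (busca : String) : Decidable (Pre_esta_no_dicionario palavras busca) := by unfold Pre_esta_no_dicionario; infer_instance
def pvWitness_esta_no_dicionario : List String × String := (["banana", "abacate"], "caju")

def Spec_esta_no_dicionario (palavras : List String) (busca : String) (out : String) : Prop := out = esta_no_dicionario_alt palavras busca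
instance (palavras : List String) (busca : String) (out : String) : Decidable (Spec_esta_no_dicionario palavras busca out) := by unfold Spec_esta_no_dicionario; infer_instance

-- ===== CLAIM (what is proved, stated in full; the proofs are below) =====
def Claim_equal_esta_no_dicionario : Prop := ∀ (palavras : List String) (busca : String), Dom_esta_no_dicionario palavras busca → Pre_esta_no_dicionario palavras busca → Spec_esta_no_dicionario palavras busca (esta_no_dicionario palavras busca)

-- ===== LEMMAS AND PROOFS =====

theorem pv_pairwise_le_getLast {l : List String} (hp : l.Pairwise (· ≤ ·)) (hne : l ≠ []) :
    ∀ y ∈ l, y ≤ l.getLast hne := by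
  induction l with
  | nil => cases hne rfl
  | cons a t ih =>
    intro y hy
    cases t with
    | nil => simp at hy; simp [hy, List.getLast]
    | cons b r =>
      rw [List.getLast_cons (by simp)]
      rcases List.mem_cons.mp hy with h | h
      · subst h
        exact (List.pairwise_cons.mp hp).1 _ (List.getLast_mem _)
      · exact ih (List.pairwise_cons.mp hp).2 (by simp) y h

theorem pv_max?_eq_getLast (xs s : List String) (hperm : s.Perm xs)
    (hp : s.Pairwise (· ≤ ·)) (hne : s ≠ []) :
    PySem.List.max? xs (fun x => x) = some (s.getLast hne) := by
  have hxne : xs ≠ [] := by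
    intro h; subst h; exact hne (List.Perm.eq_nil hperm)
  obtain ⟨m, hm⟩ : ∃ m, PySem.List.max? xs (fun x => x) = some m := by
    rcases h : PySem.List.max? xs (fun x => x) with _ | m
    · exact absurd ((PySem.List.max?_eq_none_iff xs _).mp h) hxne
    · exact ⟨m, rfl⟩
  have hmmem : m ∈ s := hperm.mem_iff.mpr (PySem.List.max?_mem hm)
  have hglast : s.getLast hne ∈ xs := hperm.mem_iff.mp (List.getLast_mem hne)
  have h1 : s.getLast hne ≤ m := PySem.List.max?_isMax hm _ hglast
  have h2 : m ≤ s.getLast hne := pv_pairwise_le_getLast hp hne m hmmem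
  rw [hm, le_antisymm h2 h1]

theorem pv_min?_eq_head (xs : List String) (h : String) (t : List String)
    (hperm : (h :: t).Perm xs) (hp : (h :: t).Pairwise (· ≤ ·)) :
    PySem.List.min? xs (fun x => x) = some h := by
  obtain ⟨m, hm⟩ : ∃ m, PySem.List.min? xs (fun x => x) = some m := by
    rcases hq : PySem.List.min? xs (fun x => x) with _ | m
    · have := (PySem.List.min?_eq_none_iff xs _).mp hq
      exact absurd (this ▸ hperm).eq_nil (by simp)
    · exact ⟨m, rfl⟩
  have hmmem : m ∈ h :: t := hperm.mem_iff.mpr (PySem.List.min?_mem hm)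
  have h1 : m ≤ h := PySem.List.min?_isMin hm _ (hperm.mem_iff.mp (by simp))
  have h2 : h ≤ m := by
    rcases List.mem_cons.mp hmmem with h' | h'
    · exact le_of_eq h'.symm
    · exact (List.pairwise_cons.mp hp).1 _ h'
  rw [hm, le_antisymm h2 h1]

theorem pvALoop_skip (s : List String) (busca : String) (u t : List String) (k : Int)
    (hu : ∀ p ∈ u, ¬ busca < p) :
    pvALoop s busca (PySem.List.enumerate (u ++ t) k)
      = pvALoop s busca (PySem.List.enumerate t (k + u.length)) := by
  induction u generalizing k with
  | nil => simp
  | cons a u' ih =>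
    rw [List.cons_append, PySem.List.enumerate_cons, pvALoop]
    rw [if_neg (hu a (by simp))]
    rw [ih (k + 1) (fun p hp => hu p (by simp [hp]))]
    have harg : k + 1 + (u'.length : Int) = k + ((a :: u').length : Int) := by
      simp only [List.length_cons]
      push_cast
      ring
    rw [harg]

theorem pvALoop_hit (s : List String) (busca : String) (k : Int) (palavra : String)
    (rest : List String) (h : busca < palavra) :
    pvALoop s busca (PySem.List.enumerate (palavra :: rest) k)
      = some ("'" ++ busca ++ "' não encontrada. Você quis dizer '" ++
        (if k > 0 then (PySem.List.pyGet? s (k - 1)).getD "" else " ") ++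
        "' ou '" ++ palavra ++ "'?") := by
  rw [PySem.List.enumerate_cons, pvALoop, if_pos h]

-- ===== VERDICT (by name: the statement is the Claim_ definition above) =====
theorem esta_no_dicionario_spec : Claim_equal_esta_no_dicionario := by
  intro palavras busca _ hpre
  unfold Spec_esta_no_dicionario esta_no_dicionario esta_no_dicionario_alt
  simp only []
  set s := PySem.List.sorted palavras (fun x => x) false with hs
  have hperm : s.Perm palavras := PySem.List.sorted_perm ..
  have hpair : s.Pairwise (fun a b => a ≤ b) := PySem.List.sorted_pairwise ..
  have hsne : s ≠ [] := by
    intro h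
    exact hpre (List.Perm.eq_nil (h ▸ hperm).symm)
  have hmem : (busca ∈ s) = (busca ∈ palavras) := propext hperm.mem_iff
  by_cases hb : busca ∈ palavras
  · rw [if_pos (hmem ▸ hb), if_pos hb]
  · rw [if_neg (hmem ▸ hb), if_neg hb]
    -- split s at the first word greater than busca
    set u := s.takeWhile (fun p => !decide (busca < p)) with hu'
    set t := s.dropWhile (fun p => !decide (busca < p)) with ht'
    have hsplit : u ++ t = s := List.takeWhile_append_dropWhile
    have hu : ∀ p ∈ u, ¬ busca < p := by
      intro p hp
      have := List.mem_takeWhile_imp hp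
      simpa using this
    have ht : ∀ p ∈ t, busca < p := by
      intro p hp
      cases htt : t with
      | nil => rw [htt] at hp; cases hp
      | cons h r =>
        have hd : List.dropWhile (fun p => !decide (busca < p)) s = h :: r := by
          rw [← ht', htt]
        have hhead : busca < h := by
          have := List.head_dropWhile_not (p := fun p => !decide (busca < p)) (l := s)
            (by rw [hd]; simp)
          simp only [hd] at this
          simpa using this
        have hpt : t.Pairwise (fun a b => a ≤ b) := by
          have := hsplit ▸ hpair
          exact (List.pairwise_append.mp this).2.1
        rw [htt] at hp hpt
        rcases List.mem_cons.mp hp with h' | h'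
        · exact h' ▸ hhead
        · exact lt_of_lt_of_le hhead ((List.pairwise_cons.mp hpt).1 _ h')
    have hbs : busca ∉ s := hmem ▸ hb
    -- B's two filters, computed on s via the permutation
    have hfil_t : s.filter (fun p => decide (busca < p)) = t := by
      rw [← hsplit, List.filter_append]
      rw [List.filter_eq_nil_iff.mpr (by intro p hp; simpa using hu p hp)]
      rw [List.filter_eq_self.mpr (by intro p hp; simpa using ht p hp)]
      simp
    have hfil_u : s.filter (fun p => decide (p < busca)) = u := by
      rw [← hsplit, List.filter_append]
      rw [List.filter_eq_self.mpr (by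
        intro p hp
        have h1 : p ≤ busca := not_lt.mp (hu p hp)
        have h2 : p ≠ busca := by
          intro h; exact hbs (h ▸ (hsplit ▸ List.mem_append_left t hp))
        simpa using lt_of_le_of_ne h1 h2)]
      rw [List.filter_eq_nil_iff.mpr (by
        intro p hp
        simpa using not_lt.mpr (le_of_lt (ht p hp)))]
      simp
    have hmaior : (palavras.filter (fun p => decide (busca < p))).Perm t := by
      rw [← hfil_t]; exact (hperm.filter _).symm
    have hmenor : (palavras.filter (fun p => decide (p < busca))).Perm u := by
      rw [← hfil_u]; exact (hperm.filter _).symm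
    have huvt : u ++ t ≠ [] := by rw [hsplit]; exact hsne
    have hpvt : (u ++ t).Pairwise (fun a b : String => a ≤ b) := by rw [hsplit]; exact hpair
    have hpermvt : (u ++ t).Perm palavras := by rw [hsplit]; exact hperm
    rw [← hsplit, pvALoop_skip (u ++ t) busca u t 0 hu, zero_add]
    cases htt : t with
    | nil =>
      -- no word greater than busca: both take the "Última palavra" branch
      rw [htt] at hmaior hpvt hpermvt huvt
      have hmnil : palavras.filter (fun p => decide (busca < p)) = [] := hmaior.eq_nil
      rw [PySem.List.enumerate_nil]
      show (match pvALoop (u ++ []) busca [] with | some r => r | none => _) = _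
      rw [if_pos hmnil]
      simp only [pvALoop]
      rw [PySem.List.pyGet?_neg_one,
        pv_max?_eq_getLast palavras (u ++ []) hpermvt hpvt huvt,
        List.getLast?_eq_some_getLast huvt]
    | cons h r =>
      rw [htt] at hmaior ht hpvt hpermvt huvt
      have hmne : palavras.filter (fun p => decide (busca < p)) ≠ [] := by
        intro hnil; rw [hnil] at hmaior
        exact absurd hmaior.symm.eq_nil (by simp)
      rw [pvALoop_hit (u ++ h :: r) busca _ h r (ht h (by simp))]
      rw [if_neg hmne]
      have hpt : (h :: r).Pairwise (fun a b : String => a ≤ b) :=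
        (List.pairwise_append.mp hpvt).2.1
      rw [pv_min?_eq_head _ h r hmaior.symm hpt]
      -- the 'anterior' component
      by_cases hunil : u = []
      · rw [hunil] at hmenor ⊢
        rw [if_neg (by simp), if_pos hmenor.eq_nil]
        rfl
      · have hlnat : 0 < u.length := List.length_pos_iff.mpr hunil
        have hmenne : palavras.filter (fun p => decide (p < busca)) ≠ [] := by
          intro hnil; rw [hnil] at hmenor
          exact hunil hmenor.symm.eq_nil
        have hupair : u.Pairwise (fun a b : String => a ≤ b) :=
          (List.pairwise_append.mp hpvt).1
        rw [if_pos (show ((u.length : Int) > 0) by exact_mod_cast hlnat), if_neg hmenne]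
        rw [pv_max?_eq_getLast _ u hmenor.symm hupair hunil]
        have hidx : PySem.List.pyGet? (u ++ h :: r) ((u.length : Int) - 1)
            = some (u.getLast hunil) := by
          rw [PySem.List.pyGet?_of_nonneg (u ++ h :: r) (show (0:Int) ≤ (u.length : Int) - 1 by omega)]
          have h1 : ((u.length : Int) - 1).toNat = u.length - 1 := by omega
          rw [h1]
          rw [List.getElem?_append_left (by omega)]
          rw [← List.getLast?_eq_some_getLast hunil, List.getLast?_eq_getElem?]
        rw [hidx]
        rfl
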